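-- pv_equiv track=rewrite | github.com/HSJung93/-Python-CodingPractices | boj/intermediate-1/boj-1790.py | calc
-- ===== SOURCE A (Python) =====
-- def calc(N):
--   ans = 0
--   # 543
--   # 543 - 100 + 1
--   size = len(str(N)) # 3
--   ans = 0
--   for s in range(size, 0, -1):
--     ans += (N - 10**(s-1) + 1) * s
--     N = 10**(s-1)-1
--
--   return ans
-- ===== SOURCE B (Python) =====
-- def calc(N):
--   L = len(str(N))
--   return (N + 1) * L - (10**L - 1) // 9
-- ===== Notes on version B (the rewrite author's own statement) =====
-- stated objective: simpler
-- what changed: Replaces the per-digit-length loop by a closed form: with L = len(str(N)), return (N+1)*L minus the L-digit repunit; no loop at all.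
import Mathlib
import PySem

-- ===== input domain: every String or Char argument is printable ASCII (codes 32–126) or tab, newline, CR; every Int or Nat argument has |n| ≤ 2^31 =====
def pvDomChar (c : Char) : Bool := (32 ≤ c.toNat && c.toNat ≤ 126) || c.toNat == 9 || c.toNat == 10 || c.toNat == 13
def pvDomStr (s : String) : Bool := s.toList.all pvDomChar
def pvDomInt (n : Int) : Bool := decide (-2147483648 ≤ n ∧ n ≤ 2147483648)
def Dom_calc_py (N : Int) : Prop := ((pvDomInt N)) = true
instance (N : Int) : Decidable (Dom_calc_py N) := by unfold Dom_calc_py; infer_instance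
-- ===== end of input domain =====

-- B replaces A's per-digit-length loop by the closed form (N+1)*L - (10^L-1)//9, L = len(str(N)): simpler, no loop.

-- ===== PORT A =====
def calc_py (N : Int) : Int :=
  let size : Int := PySem.Str.len (PySem.Int.toStr N)
  let st : Int × Int :=
    (PySem.List.pyRange size 0 (-1)).foldl
      (fun (st : Int × Int) s =>
        (st.1 + (st.2 - 10 ^ (s - 1).toNat + 1) * s, 10 ^ (s - 1).toNat - 1))
      (0, N)
  st.1

-- ===== PORT B =====
def calc_py_alt (N : Int) : Int :=
  let L : Int := PySem.Str.len (PySem.Int.toStr N)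
  (N + 1) * L - PySem.Int.floordiv (10 ^ L.toNat - 1) 9

-- ===== PRECONDITION & SPEC =====
def Spec_calc_py (N : Int) (out : Int) : Prop := out = calc_py_alt N
instance (N : Int) (out : Int) : Decidable (Spec_calc_py N out) := by unfold Spec_calc_py; infer_instance

-- ===== CLAIM (what is proved, stated in full; the proofs are below) =====
def Claim_equal_calc_py : Prop := ∀ (N : Int), Dom_calc_py N → Spec_calc_py N (calc_py N)

-- ===== LEMMAS AND PROOFS =====

/-- The repunit 1…1 (`L` ones), i.e. (10^L - 1)/9. -/
def pvRepunit : Nat → Int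
  | 0 => 0
  | n + 1 => 10 * pvRepunit n + 1

theorem pvNineRepunit (n : Nat) : 9 * pvRepunit n + 1 = 10 ^ n := by
  induction n with
  | zero => simp [pvRepunit]
  | succ n ih => simp only [pvRepunit, pow_succ]; linarith

theorem pvLoopEq (L : Nat) : ∀ (ans N : Int),
    ((PySem.List.pyRange (L : Int) 0 (-1)).foldl
      (fun (st : Int × Int) s =>
        (st.1 + (st.2 - 10 ^ (s - 1).toNat + 1) * s, 10 ^ (s - 1).toNat - 1))
      (ans, N)).1
    = ans + (N + 1) * L - pvRepunit L := by
  induction L with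
  | zero =>
    intro ans N
    rw [PySem.List.pyRange_neg_one_eq_nil (by norm_num)]
    simp [pvRepunit]
  | succ n ih =>
    intro ans N
    rw [PySem.List.pyRange_neg_one_cons (by positivity : (0:Int) < ((n+1 : Nat) : Int))]
    have hs : (((n+1 : Nat) : Int) - 1).toNat = n := by omega
    simp only [List.foldl_cons, hs]
    have hstep : ((n+1 : Nat) : Int) - 1 = (n : Int) := by push_cast; ring
    rw [hstep, ih]
    have h9 := pvNineRepunit n
    simp only [pvRepunit]
    push_cast
    linear_combination h9

theorem pvFloordivRepunit (m : Nat) :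
    PySem.Int.floordiv (10 ^ m - 1) 9 = pvRepunit m := by
  have h9 := pvNineRepunit m
  have h : (10:Int) ^ m - 1 = 9 * pvRepunit m := by linarith
  rw [h, PySem.Int.floordiv_eq_ediv_of_pos (by norm_num)]
  exact Int.mul_ediv_cancel_left _ (by norm_num)

-- ===== VERDICT (by name: the statement is the Claim_ definition above) =====
theorem calc_py_spec : Claim_equal_calc_py := by
  intro N _
  unfold Spec_calc_py calc_py calc_py_alt
  have hlen : PySem.Str.len (PySem.Int.toStr N)
      = ((PySem.Int.toStr N).toList.length : Int) := PySem.Str.len_eq _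
  set m : Nat := (PySem.Int.toStr N).toList.length with hm
  simp only [hlen]
  rw [pvLoopEq m 0 N]
  have ht : ((m : Int)).toNat = m := Int.toNat_natCast m
  rw [ht, pvFloordivRepunit m]
  ring
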